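-- pv_equiv track=rewrite | github.com/nightowl2002/data-structuresand-algorith-project-1 | a1_partd.py | get_overflow_list
-- ===== SOURCE A (Python) =====
-- def get_overflow_list(grid):
--     rows, cols = len(grid), len(grid[0])
--     overflow_list = []
--
--     for i in range(rows):
--         for j in range(cols):
--             neighbors = [
--                 (i-1, j), (i+1, j), (i, j-1), (i, j+1)
--             ]
--
--             neighbor_count = sum(1 for x, y in neighbors if 0 <= x < rows and 0 <= y < cols)
--
--             if grid[i][j] >= neighbor_count:
--                 overflow_list.append((i, j))
--
--     return overflow_list
-- ===== SOURCE B (Python) =====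
-- def get_overflow_list(grid):
--     rows, cols = len(grid), len(grid[0])
--     # degree tables of the row/column path graphs, built by iterating over
--     # adjacencies: each adjacent pair contributes 1 to both endpoints
--     vdeg = [0] * rows
--     for t in range(rows - 1):
--         vdeg[t] += 1
--         vdeg[t + 1] += 1
--     hdeg = [0] * cols
--     for t in range(cols - 1):
--         hdeg[t] += 1
--         hdeg[t + 1] += 1
--     overflow_list = []
--     for i in range(rows):
--         for j in range(cols):
--             if grid[i][j] >= vdeg[i] + hdeg[j]:
--                 overflow_list.append((i, j))
--     return overflow_list
-- ===== Notes on version B (the rewrite author's own statement) =====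
-- stated objective: alternative
-- what changed: B precomputes two 1-D degree tables (path-graph degrees of the row indices and of the column indices) by iterating over adjacent index pairs and incrementing both endpoints, then the scan just compares each cell against vdeg[i]+hdeg[j]; A's per-cell 4-element candidate-neighbor list and its bounds-checking filter disappear entirely.
import Mathlib
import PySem

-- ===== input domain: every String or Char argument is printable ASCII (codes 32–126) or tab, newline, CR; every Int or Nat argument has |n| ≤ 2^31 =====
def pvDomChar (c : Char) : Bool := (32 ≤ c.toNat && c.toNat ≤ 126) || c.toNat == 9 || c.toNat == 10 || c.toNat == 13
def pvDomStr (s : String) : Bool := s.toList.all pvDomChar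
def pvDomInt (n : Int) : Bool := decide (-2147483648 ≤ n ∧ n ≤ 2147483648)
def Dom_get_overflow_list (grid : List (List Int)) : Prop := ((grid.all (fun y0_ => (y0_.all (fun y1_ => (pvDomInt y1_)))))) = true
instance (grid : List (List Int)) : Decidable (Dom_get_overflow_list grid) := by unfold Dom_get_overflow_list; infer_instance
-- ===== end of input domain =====

-- B replaces A's per-cell 4-element neighbor list + bounds filter by two precomputed
-- 1-D path-graph degree tables built from adjacent index pairs (objective: alternative).

-- ===== PORT A =====
def get_overflow_list (grid : List (List Int)) : List (Int × Int) :=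
  let rows := grid.length
  let cols := (grid.headD []).length
  (List.range rows).foldl (fun acc (i : ℕ) =>
    (List.range cols).foldl (fun acc (j : ℕ) =>
      let neighbors : List (Int × Int) :=
        [((i : Int) - 1, (j : Int)), ((i : Int) + 1, (j : Int)),
         ((i : Int), (j : Int) - 1), ((i : Int), (j : Int) + 1)]
      let neighbor_count : Int :=
        ((neighbors.filter (fun p =>
          0 ≤ p.1 && p.1 < (rows : Int) && 0 ≤ p.2 && p.2 < (cols : Int))).length : Int)
      if neighbor_count ≤ (grid.getD i []).getD j 0 then
        acc ++ [((i : Int), (j : Int))]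
      else acc) acc) []

-- ===== PORT B =====
-- degree table of the path graph on n indices, built by iterating over the n-1
-- adjacent pairs and incrementing both endpoints (Source B's vdeg/hdeg loops)
def pathDeg (n : ℕ) : List Int :=
  (List.range (n - 1)).foldl (fun d (t : ℕ) =>
    let d1 := d.set t (d.getD t 0 + 1)
    d1.set (t + 1) (d1.getD (t + 1) 0 + 1)) (List.replicate n (0 : Int))

def get_overflow_list_alt (grid : List (List Int)) : List (Int × Int) :=
  let rows := grid.length
  let cols := (grid.headD []).length
  let vdeg := pathDeg rows
  let hdeg := pathDeg cols
  (List.range rows).foldl (fun acc (i : ℕ) =>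
    (List.range cols).foldl (fun acc (j : ℕ) =>
      if vdeg.getD i 0 + hdeg.getD j 0 ≤ (grid.getD i []).getD j 0 then
        acc ++ [((i : Int), (j : Int))]
      else acc) acc) []

-- ===== PRECONDITION & SPEC =====
-- Pre_ excludes exactly the inputs where A raises IndexError: the empty grid
-- (grid[0]) and grids with a row shorter than row 0 (grid[i][j]); B raises there too.
def Pre_get_overflow_list (grid : List (List Int)) : Prop :=
  grid ≠ [] ∧ ∀ row ∈ grid, (grid.headD []).length ≤ row.length
instance (grid : List (List Int)) : Decidable (Pre_get_overflow_list grid) := by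
  unfold Pre_get_overflow_list; infer_instance

def pvWitness_get_overflow_list : List (List Int) := [[2, 1], [0, 3]]

def Spec_get_overflow_list (grid : List (List Int)) (out : List (Int × Int)) : Prop := out = get_overflow_list_alt grid
instance (grid : List (List Int)) (out : List (Int × Int)) : Decidable (Spec_get_overflow_list grid out) := by unfold Spec_get_overflow_list; infer_instance

-- ===== CLAIM (what is proved, stated in full; the proofs are below) =====
def Claim_equal_get_overflow_list : Prop := ∀ (grid : List (List Int)), Dom_get_overflow_list grid → Pre_get_overflow_list grid → Spec_get_overflow_list grid (get_overflow_list grid)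

-- ===== LEMMAS AND PROOFS =====

-- value of the degree table after processing the first k adjacent pairs
def degVal (k j : ℕ) : Int :=
  (if j < k then 1 else 0) + (if 0 < j ∧ j ≤ k then 1 else 0)

theorem pathDeg_inv (n k : ℕ) (hk : k ≤ n - 1) :
    (List.range k).foldl (fun d (t : ℕ) =>
      let d1 := d.set t (d.getD t 0 + 1)
      d1.set (t + 1) (d1.getD (t + 1) 0 + 1)) (List.replicate n (0 : Int))
    = (List.range n).map (fun j => degVal k j) := by
  induction k with
  | zero =>
    apply List.ext_getElem
    · simp
    · intro i h1 h2
      simp only [List.range_zero, List.foldl_nil, List.getElem_replicate,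
        List.getElem_map, List.getElem_range, degVal]
      all_goals split_ifs <;> omega
  | succ k ih =>
    have hk' : k ≤ n - 1 := Nat.le_of_succ_le hk
    have hkn : k + 1 < n := by omega
    rw [List.range_succ, List.foldl_append, ih hk']
    simp only [List.foldl_cons, List.foldl_nil]
    apply List.ext_getElem
    · simp
    · intro i h1 h2
      have hi : i < n := by simpa using h2
      have hklen : k < ((List.range n).map (fun j => degVal k j)).length := by
        simp; omega
      have hk1len : k + 1 < ((List.range n).map (fun j => degVal k j)).length := by
        simp; omega
      simp only [List.getElem_set, List.getD_eq_getElem?_getD, List.getElem?_set,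
        List.getElem_map, List.getElem_range]
      rcases Nat.lt_trichotomy i k with h | h | h
      · have : ¬ (k + 1 = i) := by omega
        have : ¬ (k = i) := by omega
        simp_all [degVal]
        all_goals split_ifs <;> omega
      · subst h
        simp_all [degVal]
        all_goals split_ifs <;> omega
      · rcases Nat.eq_or_lt_of_le h with h' | h'
        · have hii : i = k + 1 := h'.symm
          subst hii
          simp_all [degVal]
        · have : ¬ (k + 1 = i) := by omega
          have : ¬ (k = i) := by omega
          simp_all [degVal]
          all_goals split_ifs <;> omega

theorem pathDeg_getD (n j : ℕ) (hj : j < n) :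
    (pathDeg n).getD j 0
    = (if 0 < j then 1 else 0) + (if j < n - 1 then 1 else 0) := by
  unfold pathDeg
  rw [pathDeg_inv n (n - 1) (le_refl _)]
  have : ((List.range n).map (fun j => degVal (n - 1) j)).getD j 0 = degVal (n - 1) j := by
    rw [List.getD_eq_getElem _ _ (by simpa using hj)]
    simp
  rw [this]
  unfold degVal
  all_goals split_ifs <;> omega

-- A's filtered 4-neighbor count equals the sum of the two degree-table entries.
theorem count4 (rows cols i j : ℕ) (hi : i < rows) (hj : j < cols) :
    ((([((i : Int) - 1, (j : Int)), ((i : Int) + 1, (j : Int)),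
        ((i : Int), (j : Int) - 1), ((i : Int), (j : Int) + 1)] :
        List (Int × Int)).filter (fun p =>
      0 ≤ p.1 && p.1 < (rows : Int) && 0 ≤ p.2 && p.2 < (cols : Int))).length : Int)
    = (pathDeg rows).getD i 0 + (pathDeg cols).getD j 0 := by
  rw [pathDeg_getD rows i hi, pathDeg_getD cols j hj]
  have e1 : (decide (0 ≤ (i : Int) - 1) && decide ((i : Int) - 1 < (rows : Int)) &&
      decide (0 ≤ (j : Int)) && decide ((j : Int) < (cols : Int))) = decide (0 < i) := by
    rw [Bool.eq_iff_iff]; simp only [Bool.and_eq_true, decide_eq_true_eq]; omega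
  have e2 : (decide (0 ≤ (i : Int) + 1) && decide ((i : Int) + 1 < (rows : Int)) &&
      decide (0 ≤ (j : Int)) && decide ((j : Int) < (cols : Int))) = decide (i < rows - 1) := by
    rw [Bool.eq_iff_iff]; simp only [Bool.and_eq_true, decide_eq_true_eq]; omega
  have e3 : (decide (0 ≤ (i : Int)) && decide ((i : Int) < (rows : Int)) &&
      decide (0 ≤ (j : Int) - 1) && decide ((j : Int) - 1 < (cols : Int))) = decide (0 < j) := by
    rw [Bool.eq_iff_iff]; simp only [Bool.and_eq_true, decide_eq_true_eq]; omega
  have e4 : (decide (0 ≤ (i : Int)) && decide ((i : Int) < (rows : Int)) &&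
      decide (0 ≤ (j : Int) + 1) && decide ((j : Int) + 1 < (cols : Int))) = decide (j < cols - 1) := by
    rw [Bool.eq_iff_iff]; simp only [Bool.and_eq_true, decide_eq_true_eq]; omega
  simp only [List.filter_cons, List.filter_nil, e1, e2, e3, e4, decide_eq_true_eq]
  clear e1 e2 e3 e4 hi hj
  split_ifs <;> rfl

theorem get_overflow_list_spec : Claim_equal_get_overflow_list := by
  intro grid _ _
  unfold Spec_get_overflow_list
  simp only [get_overflow_list, get_overflow_list_alt]
  apply PySem.List.foldl_congr_mem
  intro acc i hi
  apply PySem.List.foldl_congr_mem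
  intro acc j hj
  rw [count4 grid.length (grid.headD []).length i j
    (List.mem_range.mp hi) (List.mem_range.mp hj)]
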